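-- pv_equiv track=rewrite | github.com/urokalla/Breakout_V2_Udai | breakout_dashboard_v2/breakout_v2_app/adapters/live_quotes.py | _db_symbol_candidates
-- ===== SOURCE A (Python) =====
-- def _db_symbol_candidates(sym: str) -> list[str]:
--     s = str(sym or "").strip().upper()
--     if not s:
--         return []
--     out = [s]
--     if ":" not in s:
--         out.append(f"NSE:{s}")
--     if "-" not in s:
--         out.append(f"{s}-EQ")
--     if ":" not in s and "-" not in s:
--         out.append(f"NSE:{s}-EQ")
--     # preserve order + uniqueness
--     seen = set()
--     uniq = []
--     for x in out:
--         if x not in seen: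
--             seen.add(x)
--             uniq.append(x)
--     return uniq
-- ===== SOURCE B (Python) =====
-- def _db_symbol_candidates(sym: str) -> list[str]:
--     s = str(sym or "").strip().upper()
--     if not s:
--         return []
--     prefixes = [""] if ":" in s else ["", "NSE:"]
--     suffixes = [""] if "-" in s else ["", "-EQ"]
--     return [p + s + suf for suf in suffixes for p in prefixes]
-- ===== Notes on version B (the rewrite author's own statement) =====
-- stated objective: idiomatic
-- what changed: Replaces the four conditional appends plus an explicit seen-set dedup loop with a product of two derived prefix/suffix token lists (suffix outer, prefix inner), dropping the dedup entirely because the four candidates are provably pairwise distinct.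
import Mathlib
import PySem

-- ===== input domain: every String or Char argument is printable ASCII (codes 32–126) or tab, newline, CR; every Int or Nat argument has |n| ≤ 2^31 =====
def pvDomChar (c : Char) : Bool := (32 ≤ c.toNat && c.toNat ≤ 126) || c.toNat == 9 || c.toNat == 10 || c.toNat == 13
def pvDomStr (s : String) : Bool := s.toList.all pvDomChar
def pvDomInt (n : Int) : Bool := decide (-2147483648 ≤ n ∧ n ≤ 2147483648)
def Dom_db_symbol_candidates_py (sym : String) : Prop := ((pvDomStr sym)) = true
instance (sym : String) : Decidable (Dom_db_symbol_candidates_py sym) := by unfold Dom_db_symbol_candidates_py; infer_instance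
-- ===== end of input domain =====

-- B builds the same candidates as a product of derived prefix/suffix lists and drops A's dedup pass (the four candidates are pairwise distinct); same order, same values.

-- ===== PORT A =====
def db_symbol_candidates_py (sym : String) : List String :=
  let s := PySem.Str.upper (PySem.Str.strip (if sym == "" then "" else sym))
  if s == "" then []
  else
    let out := [s]
    let out := if !(PySem.Str.isIn ":" s) then out ++ ["NSE:" ++ s] else out
    let out := if !(PySem.Str.isIn "-" s) then out ++ [s ++ "-EQ"] else out
    let out := if !(PySem.Str.isIn ":" s) && !(PySem.Str.isIn "-" s) then out ++ ["NSE:" ++ s ++ "-EQ"] else out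
    (out.foldl
      (fun (st : PySem.Set String × List String) x =>
        if PySem.Set.contains st.1 x then st else (PySem.Set.add st.1 x, st.2 ++ [x]))
      (PySem.Set.empty, [])).2

-- ===== PORT B =====
def db_symbol_candidates_py_alt (sym : String) : List String :=
  let s := PySem.Str.upper (PySem.Str.strip (if sym == "" then "" else sym))
  if s == "" then []
  else
    let prefixes := if PySem.Str.isIn ":" s then [""] else ["", "NSE:"]
    let suffixes := if PySem.Str.isIn "-" s then [""] else ["", "-EQ"]
    suffixes.flatMap (fun suf => prefixes.map (fun p => p ++ s ++ suf))

-- ===== PRECONDITION & SPEC =====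
def Spec_db_symbol_candidates_py (sym : String) (out : List String) : Prop := out = db_symbol_candidates_py_alt sym
instance (sym : String) (out : List String) : Decidable (Spec_db_symbol_candidates_py sym out) := by unfold Spec_db_symbol_candidates_py; infer_instance

-- ===== CLAIM (what is proved, stated in full; the proofs are below) =====
def Claim_equal_db_symbol_candidates_py : Prop := ∀ (sym : String), Dom_db_symbol_candidates_py sym → Spec_db_symbol_candidates_py sym (db_symbol_candidates_py sym)

-- ===== LEMMAS AND PROOFS =====

theorem pv_ne_of_len (u v : String) (h : u.toList.length ≠ v.toList.length) : u ≠ v :=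
  fun he => h (by rw [he])

-- A's dedup loop keeps seen and uniq equal as lists when they start equal.
theorem pv_fold_pair_eq (xs : List String) (u : List String) :
    (xs.foldl
      (fun (st : PySem.Set String × List String) x =>
        if PySem.Set.contains st.1 x then st else (PySem.Set.add st.1 x, st.2 ++ [x]))
      (u, u)).2 = PySem.Set.update u xs := by
  induction xs generalizing u with
  | nil => simp [PySem.Set.update]
  | cons x xs ih =>
      rw [List.foldl_cons, PySem.Set.update_cons]
      by_cases h : PySem.Set.contains u x = true
      · have hm : x ∈ u := by rwa [PySem.Set.contains_iff] at h
        rw [if_pos h, PySem.Set.add_of_mem hm]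
        exact ih u
      · have hm : x ∉ u := by rw [PySem.Set.contains_iff] at h; exact h
        rw [if_neg h, PySem.Set.add_of_not_mem hm]
        exact ih (u ++ [x])

theorem pv_nodup_four (s a b : String) (ha : 0 < a.toList.length) (hb : 0 < b.toList.length) (hab : a.toList.length ≠ b.toList.length) :
    ([s, a ++ s, s ++ b, a ++ s ++ b] : List String).Nodup := by
  have k1 : s ≠ a ++ s := pv_ne_of_len _ _ (by simp only [String.toList_append, List.length_append]; omega)
  have k2 : s ≠ s ++ b := pv_ne_of_len _ _ (by simp only [String.toList_append, List.length_append]; omega)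
  have k3 : s ≠ a ++ s ++ b := pv_ne_of_len _ _ (by simp only [String.toList_append, List.length_append]; omega)
  have k4 : a ++ s ≠ s ++ b := pv_ne_of_len _ _ (by simp only [String.toList_append, List.length_append]; omega)
  have k5 : a ++ s ≠ a ++ s ++ b := pv_ne_of_len _ _ (by simp only [String.toList_append, List.length_append]; omega)
  have k6 : s ++ b ≠ a ++ s ++ b := pv_ne_of_len _ _ (by simp only [String.toList_append, List.length_append]; omega)
  simp [List.nodup_cons, k1, k2, k3, k4, k5, k6]

theorem pv_dedup_eq_self (xs : List String) (h : xs.Nodup) :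
    (xs.foldl
      (fun (st : PySem.Set String × List String) x =>
        if PySem.Set.contains st.1 x then st else (PySem.Set.add st.1 x, st.2 ++ [x]))
      (PySem.Set.empty, [])).2 = xs := by
  have h1 := pv_fold_pair_eq xs []
  simp only [PySem.Set.empty] at h1 ⊢
  rw [h1, PySem.Set.update_nil_left]
  exact PySem.Set.ofList_eq_self_of_nodup xs h

-- ===== VERDICT (by name: the statement is the Claim_ definition above) =====
theorem db_symbol_candidates_py_spec : Claim_equal_db_symbol_candidates_py := by
  intro sym _
  unfold Spec_db_symbol_candidates_py db_symbol_candidates_py db_symbol_candidates_py_alt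
  set s := PySem.Str.upper (PySem.Str.strip (if sym == "" then "" else sym)) with hs
  by_cases h0 : s == ""
  · simp [h0]
  · simp only [h0, if_false, Bool.false_eq_true]
    by_cases hc : PySem.Str.isIn ":" s <;> by_cases hd : PySem.Str.isIn "-" s <;>
      simp only [hc, hd, Bool.not_true, Bool.not_false, Bool.false_and, Bool.and_self,
        if_true, if_false, Bool.true_and, Bool.false_eq_true]
    · rw [pv_dedup_eq_self _ (List.nodup_singleton _)]
      simp [String.append_empty, String.empty_append]
    · rw [show ([s] ++ [s ++ "-EQ"]) = [s, s ++ "-EQ"] from rfl]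
      rw [pv_dedup_eq_self _ (List.nodup_cons.2 ⟨by
        simp only [List.mem_singleton]
        exact pv_ne_of_len _ _ (by simp [String.toList_append] <;> omega),
        List.nodup_singleton _⟩)]
      simp [String.append_empty, String.empty_append]
    · rw [show ([s] ++ ["NSE:" ++ s]) = [s, "NSE:" ++ s] from rfl]
      rw [pv_dedup_eq_self _ (List.nodup_cons.2 ⟨by
        simp only [List.mem_singleton]
        exact pv_ne_of_len _ _ (by simp [String.toList_append] <;> omega),
        List.nodup_singleton _⟩)]
      simp [String.append_empty, String.empty_append]
    · rw [show ([s] ++ ["NSE:" ++ s] ++ [s ++ "-EQ"] ++ ["NSE:" ++ s ++ "-EQ"]) =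
            [s, "NSE:" ++ s, s ++ "-EQ", "NSE:" ++ s ++ "-EQ"] from rfl]
      rw [pv_dedup_eq_self _ (pv_nodup_four s "NSE:" "-EQ" (by decide) (by decide) (by decide))]
      simp [String.append_empty, String.empty_append, String.append_assoc]
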